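-- pv_equiv track=rewrite | github.com/seruva19/takenoko | src/networks/oftv2_wan.py | _resolve_block_size
-- ===== SOURCE A (Python) =====
-- from typing import Any, Dict, List, Optional, Tuple, Type
--
-- def _resolve_block_size(
--     in_features: int,
--     requested_block_size: int,
-- ) -> Tuple[int, Optional[Tuple[int, int]]]:
--     if requested_block_size <= in_features and in_features % requested_block_size == 0:
--         return requested_block_size, None
--
--     lower = min(requested_block_size, in_features)
--     while lower > 1 and (in_features % lower) != 0:
--         lower -= 1
--
--     higher = max(1, requested_block_size)
--     while higher <= in_features and (in_features % higher) != 0: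
--         higher += 1
--     if higher > in_features:
--         higher = in_features
--
--     if (requested_block_size - lower) <= (higher - requested_block_size):
--         adjusted = lower
--     else:
--         adjusted = higher
--
--     adjusted = max(1, int(adjusted))
--     return adjusted, (requested_block_size, adjusted)
-- ===== SOURCE B (Python) =====
-- import math
--
-- def _resolve_block_size(in_features, requested_block_size):
--     n, req = in_features, requested_block_size
--     if 0 < req <= n and n % req == 0:
--         return req, None
--     below, above = 1, n
--     for d in range(1, math.isqrt(n) + 1):
--         if n % d == 0:
--             for e in (d, n // d):
--                 if e <= req:
--                     below = max(below, e)
--                 elif e < above: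
--                     above = e
--     adjusted = below if req - below <= above - req else above
--     adjusted = max(1, adjusted)
--     return adjusted, (req, adjusted)
-- ===== Notes on version B (the rewrite author's own statement) =====
-- stated objective: faster
-- what changed: A scans linearly down from the request for the nearest divisor below and linearly up for the nearest divisor above (O(in_features) steps); B enumerates all divisors of in_features once via the d <-> n//d pairing up to isqrt(in_features), keeping the largest divisor <= the request and the smallest one above it, then clamps to >= 1. Pre_ excludes requested_block_size = 0 (A raises ZeroDivisionError) and negative in_features, outside the natural domain of a layer width, where B's isqrt raises.
-- intended difference: On negative requested_block_size that divides in_features (by Python's sign rule for %), A's fast path lacks a positivity check and returns (requested_block_size, None) - a negative block size - while B returns (1, (requested_block_size, 1)), the nearest valid divisor, which is the intended behaviour. — e.g. on _resolve_block_size(12, -4): A returns (-4, none), B returns (1, some (-4, 1))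
-- outside the precondition, e.g. on _resolve_block_size(-6, 4): A returns (1, (4, 1)), B raises ValueError; on _resolve_block_size(-12, -12): A returns (-12, None), B raises ValueError
import Mathlib
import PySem

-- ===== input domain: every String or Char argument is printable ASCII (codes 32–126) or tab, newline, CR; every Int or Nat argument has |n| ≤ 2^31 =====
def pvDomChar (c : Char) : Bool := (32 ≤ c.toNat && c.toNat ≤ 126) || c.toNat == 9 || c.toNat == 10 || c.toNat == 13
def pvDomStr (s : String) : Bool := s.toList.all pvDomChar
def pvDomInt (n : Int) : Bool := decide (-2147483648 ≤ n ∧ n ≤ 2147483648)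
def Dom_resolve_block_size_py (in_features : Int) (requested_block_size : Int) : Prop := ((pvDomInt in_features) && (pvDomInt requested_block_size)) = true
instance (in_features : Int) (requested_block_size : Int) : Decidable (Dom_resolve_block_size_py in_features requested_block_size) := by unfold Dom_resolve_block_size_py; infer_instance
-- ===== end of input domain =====

-- B replaces A's two linear scans (down from the request, up from the request) by one
-- O(sqrt(in_features)) enumeration of all divisors via the d ↔ n//d pairing; objective: faster.

-- ===== PORT A =====
-- `while lower > 1 and (in_features % lower) != 0: lower -= 1`
def pvLowerLoop (n lower : Int) : Int :=
  if 1 < lower ∧ PySem.Int.mod n lower ≠ 0 then pvLowerLoop n (lower - 1) else lower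
termination_by lower.toNat
decreasing_by omega

-- `while higher <= in_features and (in_features % higher) != 0: higher += 1`
def pvHigherLoop (n higher : Int) : Int :=
  if higher ≤ n ∧ PySem.Int.mod n higher ≠ 0 then pvHigherLoop n (higher + 1) else higher
termination_by (n + 1 - higher).toNat
decreasing_by omega

def resolve_block_size_py (in_features : Int) (requested_block_size : Int) : Int × (Option (Int × Int)) :=
  if requested_block_size ≤ in_features ∧ PySem.Int.mod in_features requested_block_size = 0 then
    (requested_block_size, none)
  else
    let lower := pvLowerLoop in_features (min requested_block_size in_features)
    let higher0 := pvHigherLoop in_features (max 1 requested_block_size)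
    let higher := if in_features < higher0 then in_features else higher0
    let adjusted0 := if requested_block_size - lower ≤ higher - requested_block_size then lower else higher
    let adjusted := max 1 adjusted0
    (adjusted, some (requested_block_size, adjusted))

-- ===== PORT B =====
-- math.isqrt, ported by hand as a fuel-bounded binary search (exact for every natural input:
-- pvIsqrt_eq_sqrt below proves it equals Nat.sqrt; written this way so the kernel can evaluate it)
def pvIsqrtGo (n : Int) : Int → Int → Nat → Int
  | lo, _, 0 => lo
  | lo, hi, f + 1 =>
    if hi ≤ lo + 1 then lo
    else
      let m := (lo + hi) / 2
      if m * m ≤ n then pvIsqrtGo n m hi f else pvIsqrtGo n lo m f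

def pvIsqrt (n : Int) : Int := pvIsqrtGo n 0 (n + 1) (n + 1).toNat

-- body of `for e in (d, n // d)`: `if e <= req: below = max(below, e)  elif e < above: above = e`
def pvBStep (req : Int) (st : Int × Int) (e : Int) : Int × Int :=
  if e ≤ req then (max st.1 e, st.2)
  else if e < st.2 then (st.1, e)
  else st

-- body of `for d in range(1, isqrt(n)+1)`: `if n % d == 0:` feed d and n // d
def pvDivStep (n req : Int) (st : Int × Int) (d : Int) : Int × Int :=
  if PySem.Int.mod n d = 0 then pvBStep req (pvBStep req st d) (PySem.Int.floordiv n d)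
  else st

def resolve_block_size_py_alt (in_features : Int) (requested_block_size : Int) : Int × (Option (Int × Int)) :=
  if 0 < requested_block_size ∧ requested_block_size ≤ in_features ∧
      PySem.Int.mod in_features requested_block_size = 0 then
    (requested_block_size, none)
  else
    let st := (PySem.List.pyRange 1 (pvIsqrt in_features + 1) 1).foldl
      (pvDivStep in_features requested_block_size) (1, in_features)
    let adjusted0 := if requested_block_size - st.1 ≤ st.2 - requested_block_size then st.1 else st.2
    let adjusted := max 1 adjusted0
    (adjusted, some (requested_block_size, adjusted))

-- ===== PRECONDITION & SPEC =====
-- Pre_ excludes requested_block_size = 0, where A raises ZeroDivisionError, and negative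
-- in_features, which is outside the natural domain (a layer width is not negative) and where
-- B's math.isqrt raises ValueError.
def Pre_resolve_block_size_py (in_features : Int) (requested_block_size : Int) : Prop :=
  0 ≤ in_features ∧ requested_block_size ≠ 0
instance (in_features : Int) (requested_block_size : Int) : Decidable (Pre_resolve_block_size_py in_features requested_block_size) := by
  unfold Pre_resolve_block_size_py; infer_instance

def pvWitness_resolve_block_size_py : Int × Int := (12, 5)

-- On negative requested_block_size that divides in_features (Python's sign rule makes `%` zero there),
-- A's fast path lacks a positivity check and returns (requested_block_size, None) — a negative block
-- size — while B returns (1, (requested_block_size, 1)), the nearest valid divisor, which is intended.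
def D_resolve_block_size_py (in_features : Int) (requested_block_size : Int) : Prop :=
  requested_block_size < 0 ∧ requested_block_size ∣ in_features
instance (in_features : Int) (requested_block_size : Int) : Decidable (D_resolve_block_size_py in_features requested_block_size) := by
  unfold D_resolve_block_size_py; infer_instance

def Spec_resolve_block_size_py (in_features : Int) (requested_block_size : Int) (out : Int × (Option (Int × Int))) : Prop :=
  ¬ D_resolve_block_size_py in_features requested_block_size → out = resolve_block_size_py_alt in_features requested_block_size
instance (in_features : Int) (requested_block_size : Int) (out : Int × (Option (Int × Int))) : Decidable (Spec_resolve_block_size_py in_features requested_block_size out) := by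
  unfold Spec_resolve_block_size_py; infer_instance

def pvDiffWitness_resolve_block_size_py : Int × Int := (12, -4)
def pvDiffWitnessOut_resolve_block_size_py : (Int × (Option (Int × Int))) × (Int × (Option (Int × Int))) :=
  ((-4, none), (1, some (-4, 1)))

-- ===== CLAIM (what is proved, stated in full; the proofs are below) =====
def Claim_unchanged_resolve_block_size_py : Prop := ∀ (in_features : Int) (requested_block_size : Int), Dom_resolve_block_size_py in_features requested_block_size → Pre_resolve_block_size_py in_features requested_block_size → Spec_resolve_block_size_py in_features requested_block_size (resolve_block_size_py in_features requested_block_size)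

def Claim_changed_resolve_block_size_py : Prop := Dom_resolve_block_size_py (pvDiffWitness_resolve_block_size_py.1) (pvDiffWitness_resolve_block_size_py.2) ∧ Pre_resolve_block_size_py (pvDiffWitness_resolve_block_size_py.1) (pvDiffWitness_resolve_block_size_py.2) ∧ D_resolve_block_size_py (pvDiffWitness_resolve_block_size_py.1) (pvDiffWitness_resolve_block_size_py.2) ∧ resolve_block_size_py (pvDiffWitness_resolve_block_size_py.1) (pvDiffWitness_resolve_block_size_py.2) = pvDiffWitnessOut_resolve_block_size_py.1 ∧ resolve_block_size_py_alt (pvDiffWitness_resolve_block_size_py.1) (pvDiffWitness_resolve_block_size_py.2) = pvDiffWitnessOut_resolve_block_size_py.2 ∧ pvDiffWitnessOut_resolve_block_size_py.1 ≠ pvDiffWitnessOut_resolve_block_size_py.2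

def Claim_exact_resolve_block_size_py : Prop := ∀ (in_features : Int) (requested_block_size : Int), Dom_resolve_block_size_py in_features requested_block_size → Pre_resolve_block_size_py in_features requested_block_size → D_resolve_block_size_py in_features requested_block_size → resolve_block_size_py in_features requested_block_size ≠ resolve_block_size_py_alt in_features requested_block_size


-- ===== LEMMAS AND PROOFS =====

-- pvIsqrt is math.isqrt
theorem pvIsqrtGo_spec (n : Int) : ∀ (f : Nat) (lo hi : Int), 0 ≤ lo → lo < hi → lo * lo ≤ n → n < hi * hi →
    hi ≤ lo + f + 1 →
    0 ≤ pvIsqrtGo n lo hi f ∧ pvIsqrtGo n lo hi f * pvIsqrtGo n lo hi f ≤ n ∧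
      n < (pvIsqrtGo n lo hi f + 1) * (pvIsqrtGo n lo hi f + 1) := by
  intro f
  induction f with
  | zero =>
    intro lo hi hlo hlohi h1 h2 h3
    simp only [pvIsqrtGo]
    have he : hi = lo + 1 := by omega
    exact ⟨hlo, h1, he ▸ h2⟩
  | succ f ih =>
    intro lo hi hlo hlohi h1 h2 h3
    simp only [pvIsqrtGo]
    split
    · rename_i hcond
      have he : hi = lo + 1 := by omega
      exact ⟨hlo, h1, he ▸ h2⟩
    · rename_i hcond
      have hlt : lo + 1 < hi := by omega
      have hm1 : lo < (lo + hi) / 2 := by omega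
      have hm2 : (lo + hi) / 2 < hi := by omega
      split
      · exact ih ((lo + hi) / 2) hi (by omega) hm2 (by assumption) h2 (by omega)
      · exact ih lo ((lo + hi) / 2) hlo hm1 h1 (by omega) (by omega)

theorem pvIsqrt_eq_sqrt (n : Int) (hn : 0 ≤ n) : pvIsqrt n = ((Nat.sqrt n.toNat : Nat) : Int) := by
  obtain ⟨h0, h1, h2⟩ := pvIsqrtGo_spec n (n + 1).toNat 0 (n + 1) le_rfl (by omega) (by simpa) (by nlinarith) (by omega)
  set r := pvIsqrtGo n 0 (n + 1) (n + 1).toNat with hr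
  have hrn : r = ((r.toNat : Nat) : Int) := by omega
  have hnn : ((n.toNat : Nat) : Int) = n := Int.toNat_of_nonneg hn
  have hA : r.toNat * r.toNat ≤ n.toNat := by
    have := h1; rw [hrn, ← hnn] at this; exact_mod_cast this
  have hB : n.toNat < (r.toNat + 1) * (r.toNat + 1) := by
    have := h2; rw [hrn, ← hnn] at this; exact_mod_cast this
  have e1 : r.toNat ≤ Nat.sqrt n.toNat := Nat.le_sqrt.2 hA
  have e2 : Nat.sqrt n.toNat < r.toNat + 1 := Nat.sqrt_lt.2 hB
  unfold pvIsqrt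
  omega

-- A's value for lower when the loop actually runs: the largest divisor of n that is ≤ L.
def IsMaxDivLE (n L r : Int) : Prop :=
  r ∣ n ∧ 1 ≤ r ∧ r ≤ L ∧ ∀ e : Int, 1 ≤ e → e ∣ n → e ≤ L → e ≤ r

-- A's value for higher when h0 ≤ n: the smallest divisor of n that is ≥ h.
def IsMinDivGE (n h r : Int) : Prop :=
  r ∣ n ∧ h ≤ r ∧ r ≤ n ∧ ∀ e : Int, h ≤ e → e ∣ n → r ≤ e

theorem isMaxDivLE_unique {n L r1 r2 : Int} (h1 : IsMaxDivLE n L r1) (h2 : IsMaxDivLE n L r2) : r1 = r2 :=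
  le_antisymm (h2.2.2.2 r1 h1.2.1 h1.1 h1.2.2.1) (h1.2.2.2 r2 h2.2.1 h2.1 h2.2.2.1)

theorem isMinDivGE_unique {n h r1 r2 : Int} (h1 : IsMinDivGE n h r1) (h2 : IsMinDivGE n h r2) : r1 = r2 :=
  le_antisymm (h1.2.2.2 r2 h2.2.1 h2.1) (h2.2.2.2 r1 h1.2.1 h1.1)

theorem pvLowerLoop_of_le_one {n L : Int} (h : L ≤ 1) : pvLowerLoop n L = L := by
  rw [pvLowerLoop]; simp [show ¬(1 < L ∧ PySem.Int.mod n L ≠ 0) by omega]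

theorem pvLowerLoop_spec {n : Int} (hn : 1 ≤ n) : ∀ L : Int, 1 ≤ L → IsMaxDivLE n L (pvLowerLoop n L) := by
  intro L hL
  induction L, hL using Int.le_induction with
  | base =>
    rw [pvLowerLoop_of_le_one le_rfl]
    exact ⟨Int.one_dvd n, le_rfl, le_rfl, fun e he _ heL => heL⟩
  | succ L hL ih =>
    rw [pvLowerLoop]
    by_cases hd : PySem.Int.mod n (L + 1) = 0
    · have hdvd : (L + 1) ∣ n := (PySem.Int.mod_eq_zero_iff_dvd n (L + 1)).1 hd
      simp only [hd]
      simp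
      exact ⟨hdvd, by omega, le_rfl, fun e _ _ heL => heL⟩
    · have hnd : ¬ (L + 1) ∣ n := fun h => hd ((PySem.Int.mod_eq_zero_iff_dvd n (L + 1)).2 h)
      have hcond : 1 < L + 1 ∧ PySem.Int.mod n (L + 1) ≠ 0 := ⟨by omega, hd⟩
      simp only [if_pos hcond]
      have : L + 1 - 1 = L := by ring
      rw [this]
      obtain ⟨d1, d2, d3, d4⟩ := ih
      exact ⟨d1, d2, by omega, fun e he hednd heL => by
        rcases eq_or_lt_of_le heL with h | h
        · exact absurd (h ▸ hednd) hnd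
        · exact d4 e he hednd (by omega)⟩

theorem pvHigherLoop_of_gt {n h : Int} (hgt : n < h) : pvHigherLoop n h = h := by
  rw [pvHigherLoop]; simp [show ¬(h ≤ n ∧ PySem.Int.mod n h ≠ 0) by omega]

theorem pvHigherLoop_spec {n : Int} (hn : 1 ≤ n) : ∀ (k : Nat) (h : Int), n + 1 - h = (k : Int) → 1 ≤ h → h ≤ n → IsMinDivGE n h (pvHigherLoop n h) := by
  intro k
  induction k with
  | zero => intro h hk _ hle; omega
  | succ k ih =>
    intro h hk h1 hle
    rw [pvHigherLoop]
    by_cases hd : PySem.Int.mod n h = 0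
    · have hdvd : h ∣ n := (PySem.Int.mod_eq_zero_iff_dvd n h).1 hd
      simp only [hd]
      simp
      exact ⟨hdvd, le_rfl, hle, fun e he _ => he⟩
    · have hnd : ¬ h ∣ n := fun hh => hd ((PySem.Int.mod_eq_zero_iff_dvd n h).2 hh)
      have hcond : h ≤ n ∧ PySem.Int.mod n h ≠ 0 := ⟨hle, hd⟩
      simp only [if_pos hcond]
      have hne : h ≠ n := fun he => hnd (he ▸ dvd_refl n)
      obtain ⟨d1, d2, d3, d4⟩ := ih (h + 1) (by omega) (by omega) (by omega)
      exact ⟨d1, by omega, d3, fun e he hednd => by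
        rcases eq_or_lt_of_le he with h' | h'
        · exact absurd (h' ▸ hednd) hnd
        · exact d4 e (by omega) hednd⟩

-- B-side: the two components of the fold, taken separately
def pvMaxF (req a e : Int) : Int := if e ≤ req then max a e else a
def pvMinF (req a e : Int) : Int := if req < e ∧ e < a then e else a

theorem pvBStep_eq (req : Int) (st : Int × Int) (e : Int) :
    pvBStep req st e = (pvMaxF req st.1 e, pvMinF req st.2 e) := by
  obtain ⟨a, b⟩ := st
  unfold pvBStep pvMaxF pvMinF
  by_cases h1 : e ≤ req
  · rw [if_pos h1, if_pos h1, if_neg (show ¬ (req < e ∧ e < b) by omega)]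
  · rw [if_neg h1, if_neg h1]
    by_cases h2 : e < b
    · rw [if_pos h2, if_pos (show req < e ∧ e < b by omega)]
    · rw [if_neg h2, if_neg (show ¬ (req < e ∧ e < b) by omega)]

theorem foldl_bstep_eq (req : Int) : ∀ (l : List Int) (st : Int × Int),
    l.foldl (pvBStep req) st = (l.foldl (pvMaxF req) st.1, l.foldl (pvMinF req) st.2) := by
  intro l
  induction l with
  | nil => intro st; rfl
  | cons e l ih => intro st; simp only [List.foldl_cons]; rw [pvBStep_eq, ih]

-- the candidate list actually fed to the fold
def pvCandList (n : Int) (l : List Int) : List Int :=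
  l.foldr (fun d acc => if PySem.Int.mod n d = 0 then d :: PySem.Int.floordiv n d :: acc else acc) []

theorem foldl_divStep_eq {n req : Int} :
    ∀ (l : List Int) (st : Int × Int),
      l.foldl (pvDivStep n req) st = (pvCandList n l).foldl (pvBStep req) st := by
  intro l
  induction l with
  | nil => intro st; rfl
  | cons d l ih =>
    intro st
    simp only [List.foldl_cons, pvCandList, List.foldr_cons]
    unfold pvDivStep
    split
    · simp only [List.foldl_cons]; exact ih _
    · exact ih st

theorem mem_pvCandList_of {n : Int} :
    ∀ (l : List Int) (e : Int), e ∈ pvCandList n l →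
      ∃ d ∈ l, PySem.Int.mod n d = 0 ∧ (e = d ∨ e = PySem.Int.floordiv n d) := by
  intro l
  induction l with
  | nil => simp [pvCandList]
  | cons d l ih =>
    intro e he
    simp only [pvCandList, List.foldr_cons] at he
    split at he
    · rename_i hd
      rcases List.mem_cons.1 he with rfl | he2
      · exact ⟨e, List.mem_cons_self, hd, Or.inl rfl⟩
      rcases List.mem_cons.1 he2 with rfl | he'
      · exact ⟨d, List.mem_cons_self, hd, Or.inr rfl⟩
      · obtain ⟨d', hd', h1, h2⟩ := ih e he'
        exact ⟨d', List.mem_cons_of_mem d hd', h1, h2⟩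
    · obtain ⟨d', hd', h1, h2⟩ := ih e he
      exact ⟨d', List.mem_cons_of_mem d hd', h1, h2⟩

theorem of_mem_pvCandList {n : Int} :
    ∀ (l : List Int) (d : Int), d ∈ l → PySem.Int.mod n d = 0 →
      d ∈ pvCandList n l ∧ PySem.Int.floordiv n d ∈ pvCandList n l := by
  intro l
  induction l with
  | nil => simp
  | cons d' l ih =>
    intro d hd hmod
    simp only [pvCandList, List.foldr_cons]
    rcases List.mem_cons.1 hd with rfl | hd'
    · rw [if_pos hmod]
      exact ⟨List.mem_cons_self, List.mem_cons_of_mem _ List.mem_cons_self⟩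
    · obtain ⟨h1, h2⟩ := ih d hd' hmod
      split
      · exact ⟨List.mem_cons_of_mem _ (List.mem_cons_of_mem _ h1),
               List.mem_cons_of_mem _ (List.mem_cons_of_mem _ h2)⟩
      · exact ⟨h1, h2⟩

-- divisors of n in [1, n] are exactly the members of the candidate list over range(1, isqrt(n)+1)
theorem mem_pvCandList_iff {n : Int} (hn : 1 ≤ n) {e : Int} :
    e ∈ pvCandList n (PySem.List.pyRange 1 (pvIsqrt n + 1) 1) ↔ 1 ≤ e ∧ e ∣ n ∧ e ≤ n := by
  rw [pvIsqrt_eq_sqrt n (by omega)]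
  set s : Int := ((Nat.sqrt n.toNat : Nat) : Int) with hs
  have hs_le : s ≤ n := by
    have := Nat.sqrt_le_self n.toNat
    omega
  have hs_pos : 1 ≤ s := by
    have : 1 ≤ Nat.sqrt n.toNat := by
      rw [Nat.one_le_iff_ne_zero, Ne, Nat.sqrt_eq_zero]
      omega
    omega
  constructor
  · intro he
    obtain ⟨d, hd, hmod, hcase⟩ := mem_pvCandList_of _ e he
    rw [PySem.List.mem_pyRange_one] at hd
    have hd1 : 1 ≤ d := hd.1
    have hds : d ≤ s := by omega
    have hdvd : d ∣ n := (PySem.Int.mod_eq_zero_iff_dvd n d).1 hmod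
    rcases hcase with rfl | rfl
    · exact ⟨hd1, hdvd, le_trans hds hs_le⟩
    · rw [PySem.Int.floordiv_eq_ediv_of_pos (by omega)]
      obtain ⟨c, hc⟩ := hdvd
      have hc1 : 1 ≤ c := by nlinarith
      refine ⟨?_, ?_, ?_⟩
      · rw [hc, Int.mul_ediv_cancel_left c (by omega)]; exact hc1
      · rw [hc, Int.mul_ediv_cancel_left c (by omega)]; exact ⟨d, by ring⟩
      · rw [hc, Int.mul_ediv_cancel_left c (by omega)]; nlinarith
  · rintro ⟨he1, hedvd, hen⟩
    obtain ⟨c, hc⟩ := hedvd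
    have hc1 : 1 ≤ c := by nlinarith
    have hsplit : e.toNat ≤ Nat.sqrt n.toNat ∨ c.toNat ≤ Nat.sqrt n.toNat := by
      refine Nat.le_sqrt_of_eq_mul (b := e.toNat) (c := c.toNat) ?_
      have he' : ((e.toNat : Nat) : Int) = e := by omega
      have hc' : ((c.toNat : Nat) : Int) = c := by omega
      have hn' : ((n.toNat : Nat) : Int) = n := by omega
      rw [← he', ← hc', ← hn'] at hc
      exact_mod_cast hc
    rcases hsplit with hsmall | hcos
    · have hd : e ∈ PySem.List.pyRange 1 (s + 1) 1 := by
        rw [PySem.List.mem_pyRange_one]; omega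
      have hmod : PySem.Int.mod n e = 0 := (PySem.Int.mod_eq_zero_iff_dvd n e).2 ⟨c, hc⟩
      exact (of_mem_pvCandList _ e hd hmod).1
    · have hcs : c ≤ s := by omega
      have hd : c ∈ PySem.List.pyRange 1 (s + 1) 1 := by
        rw [PySem.List.mem_pyRange_one]; omega
      have hmod : PySem.Int.mod n c = 0 := (PySem.Int.mod_eq_zero_iff_dvd n c).2 ⟨e, by rw [hc]; ring⟩
      have := (of_mem_pvCandList _ c hd hmod).2
      have heq : PySem.Int.floordiv n c = e := by
        rw [PySem.Int.floordiv_eq_ediv_of_pos (by omega), hc, mul_comm,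
          Int.mul_ediv_cancel_left e (by omega)]
      rwa [heq] at this

-- elementary facts about the two component folds
theorem maxF_init_le (req : Int) : ∀ (l : List Int) (a : Int), a ≤ l.foldl (pvMaxF req) a := by
  intro l
  induction l with
  | nil => intro a; exact le_rfl
  | cons e l ih =>
    intro a
    simp only [List.foldl_cons]
    refine le_trans ?_ (ih (pvMaxF req a e))
    unfold pvMaxF; split
    · exact le_max_left a e
    · exact le_rfl

theorem maxF_cases (req : Int) : ∀ (l : List Int) (a : Int),
    l.foldl (pvMaxF req) a = a ∨ (l.foldl (pvMaxF req) a ∈ l ∧ l.foldl (pvMaxF req) a ≤ req) := by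
  intro l
  induction l with
  | nil => intro a; exact Or.inl rfl
  | cons e l ih =>
    intro a
    simp only [List.foldl_cons]
    rcases ih (pvMaxF req a e) with h | h
    · rw [h]
      unfold pvMaxF
      split
      · rename_i hcond
        rcases max_choice a e with hm | hm
        · rw [hm]; exact Or.inl rfl
        · rw [hm]; exact Or.inr ⟨List.mem_cons_self, hcond⟩
      · exact Or.inl rfl
    · exact Or.inr ⟨List.mem_cons_of_mem _ h.1, h.2⟩

theorem maxF_ub (req : Int) : ∀ (l : List Int) (a e : Int), e ∈ l → e ≤ req →
    e ≤ l.foldl (pvMaxF req) a := by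
  intro l
  induction l with
  | nil => simp
  | cons e' l ih =>
    intro a e he hreq
    simp only [List.foldl_cons]
    rcases List.mem_cons.1 he with rfl | he'
    · refine le_trans ?_ (maxF_init_le req l _)
      unfold pvMaxF; rw [if_pos hreq]; exact le_max_right a e
    · exact ih _ e he' hreq

theorem minF_le_init (req : Int) : ∀ (l : List Int) (a : Int), l.foldl (pvMinF req) a ≤ a := by
  intro l
  induction l with
  | nil => intro a; exact le_rfl
  | cons e l ih =>
    intro a
    simp only [List.foldl_cons]
    refine le_trans (ih (pvMinF req a e)) ?_
    unfold pvMinF; split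
    · rename_i hcond; omega
    · exact le_rfl

theorem minF_cases (req : Int) : ∀ (l : List Int) (a : Int),
    l.foldl (pvMinF req) a = a ∨ (l.foldl (pvMinF req) a ∈ l ∧ req < l.foldl (pvMinF req) a) := by
  intro l
  induction l with
  | nil => intro a; exact Or.inl rfl
  | cons e l ih =>
    intro a
    simp only [List.foldl_cons]
    rcases ih (pvMinF req a e) with h | h
    · rw [h]
      unfold pvMinF
      split
      · rename_i hcond
        exact Or.inr ⟨List.mem_cons_self, hcond.1⟩
      · exact Or.inl rfl
    · exact Or.inr ⟨List.mem_cons_of_mem _ h.1, h.2⟩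

theorem minF_lb (req : Int) : ∀ (l : List Int) (a e : Int), e ∈ l → req < e →
    l.foldl (pvMinF req) a ≤ e := by
  intro l
  induction l with
  | nil => simp
  | cons e' l ih =>
    intro a e he hreq
    simp only [List.foldl_cons]
    rcases List.mem_cons.1 he with rfl | he'
    · refine le_trans (minF_le_init req l _) ?_
      unfold pvMinF; split
      · exact le_rfl
      · rename_i hcond; omega
    · exact ih _ e he' hreq

-- ===== VERDICT (by name: the statements are the Claim_ definitions above) =====
theorem resolve_block_size_py_spec : Claim_unchanged_resolve_block_size_py := by
  intro n req hdom hpre hnd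
  obtain ⟨hn0, hreq0⟩ := hpre
  by_cases hn : 1 ≤ n
  case neg =>
    -- n = 0: no positive divisors; both sides clamp to the request side and return max 1 _.
    have hz : n = 0 := by omega
    subst hz
    have hpos : 0 < req := by
      by_contra h
      exact hnd ⟨by omega, dvd_zero req⟩
    unfold resolve_block_size_py resolve_block_size_py_alt
    rw [if_neg (fun h => absurd h.1 (by omega)), if_neg (fun h => absurd h.2.1 (by omega))]
    simp only
    rw [show min req 0 = 0 by omega, pvLowerLoop_of_le_one (show (0:Int) ≤ 1 by omega),
      show max 1 req = req by omega, pvHigherLoop_of_gt (show (0:Int) < req by omega),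
      if_pos (show (0:Int) < req by omega), if_neg (show ¬ (req - 0 ≤ 0 - req) by omega),
      foldl_divStep_eq, foldl_bstep_eq,
      show pvCandList 0 (PySem.List.pyRange 1 (pvIsqrt 0 + 1) 1) = [] from rfl]
    simp only [List.foldl_nil]
    rw [if_neg (show ¬ (req - 1 ≤ 0 - req) by omega)]
  unfold resolve_block_size_py resolve_block_size_py_alt
  rw [foldl_divStep_eq, foldl_bstep_eq]
  set candL := pvCandList n (PySem.List.pyRange 1 (pvIsqrt n + 1) 1) with hcandL
  set b1 := candL.foldl (pvMaxF req) 1 with hb1def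
  set b2 := candL.foldl (pvMinF req) n with hb2def
  by_cases hpos : 0 < req
  · by_cases hg : req ≤ n ∧ PySem.Int.mod n req = 0
    · rw [if_pos hg, if_pos ⟨hpos, hg.1, hg.2⟩]
    · rw [if_neg hg, if_neg (fun h => hg ⟨h.2.1, h.2.2⟩)]
      simp only
      -- lower side
      have hub : ∀ e : Int, 1 ≤ e → e ∣ n → e ≤ min req n → e ≤ b1 := by
        intro e he1 hdvd heL
        have hen : e ≤ n := Int.le_of_dvd (by omega) hdvd
        exact maxF_ub req candL 1 e ((mem_pvCandList_iff hn).2 ⟨he1, hdvd, hen⟩) (by omega)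
      have h1b1 : 1 ≤ b1 := maxF_init_le req candL 1
      have hb1spec : IsMaxDivLE n (min req n) b1 := by
        rcases maxF_cases req candL 1 with h | ⟨hmem, hle⟩
        · exact ⟨(show b1 = 1 from h).symm ▸ Int.one_dvd n, h1b1, by omega, hub⟩
        · obtain ⟨hq1, hqdvd, hqn⟩ := (mem_pvCandList_iff hn).1 hmem
          exact ⟨hqdvd, h1b1, by omega, hub⟩
      have hlower : pvLowerLoop n (min req n) = b1 :=
        isMaxDivLE_unique (pvLowerLoop_spec hn (min req n) (by omega)) hb1spec
      -- higher side
      have hmax : max 1 req = req := by omega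
      have hb2n : b2 ≤ n := minF_le_init req candL n
      by_cases hle_n : req ≤ n
      · have hndvd : ¬ req ∣ n := fun h => hg ⟨hle_n, (PySem.Int.mod_eq_zero_iff_dvd n req).2 h⟩
        have hb2spec : IsMinDivGE n req b2 := by
          have hmin : ∀ e : Int, req ≤ e → e ∣ n → b2 ≤ e := by
            intro e he hdvd
            have hne : e ≠ req := fun h => hndvd (h ▸ hdvd)
            have hen : e ≤ n := Int.le_of_dvd (by omega) hdvd
            exact minF_lb req candL n e ((mem_pvCandList_iff hn).2 ⟨by omega, hdvd, hen⟩) (by omega)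
          rcases minF_cases req candL n with h | ⟨hmem, hlt⟩
          · exact ⟨h ▸ dvd_refl n, by omega, hb2n, hmin⟩
          · obtain ⟨hq1, hqdvd, hqn⟩ := (mem_pvCandList_iff hn).1 hmem
            exact ⟨hqdvd, by omega, hb2n, hmin⟩
        have hh0 : pvHigherLoop n (max 1 req) = b2 := by
          rw [hmax]
          exact isMinDivGE_unique
            (pvHigherLoop_spec hn (n + 1 - req).toNat req (by omega) (by omega) hle_n) hb2spec
        rw [hlower, hh0, if_neg (show ¬ n < b2 by omega)]
      · have hb2eq : b2 = n := by
          rcases minF_cases req candL n with h | ⟨hmem, hlt⟩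
          · exact h
          · omega
        rw [hlower, hmax, pvHigherLoop_of_gt (show n < req by omega),
          if_pos (show n < req by omega), hb2eq]
  · -- req < 0 (req = 0 is excluded by Pre_); ¬D_ gives ¬ req ∣ n
    have hneg : req < 0 := by omega
    have hndvd : ¬ req ∣ n := fun h => hnd ⟨hneg, h⟩
    have hgA : ¬ (req ≤ n ∧ PySem.Int.mod n req = 0) := by
      rintro ⟨_, hm⟩
      exact hndvd ((PySem.Int.mod_eq_zero_iff_dvd n req).1 hm)
    rw [if_neg hgA, if_neg (fun h => absurd h.1 (by omega))]
    simp only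
    have hminr : min req n = req := by omega
    have hmaxr : max 1 req = 1 := by omega
    have hh1 : pvHigherLoop n 1 = 1 := by
      rw [pvHigherLoop]
      simp
    have hb1 : b1 = 1 := by
      rcases maxF_cases req candL 1 with h | ⟨hmem, hle⟩
      · exact h
      · have := ((mem_pvCandList_iff hn).1 hmem).1; omega
    have hb2 : b2 = 1 := by
      have hub2 : b2 ≤ 1 :=
        minF_lb req candL n 1 ((mem_pvCandList_iff hn).2 ⟨le_rfl, one_dvd n, hn⟩) (by omega)
      have hlb2 : 1 ≤ b2 := by
        rcases minF_cases req candL n with h | ⟨hmem, _⟩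
        · omega
        · exact ((mem_pvCandList_iff hn).1 hmem).1
      omega
    rw [hminr, pvLowerLoop_of_le_one (show req ≤ 1 by omega), hmaxr, hh1,
      if_neg (show ¬ n < 1 by omega), if_pos (show req - req ≤ 1 - req by omega),
      show max 1 req = 1 by omega, hb1, hb2, if_pos (show req - 1 ≤ 1 - req by omega),
      show max (1:Int) 1 = 1 by omega]

theorem resolve_block_size_py_changed : Claim_changed_resolve_block_size_py := by
  unfold Claim_changed_resolve_block_size_py; decide

theorem resolve_block_size_py_tight : Claim_exact_resolve_block_size_py := by
  intro n req hdom hpre hd heq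
  obtain ⟨hn, -⟩ := hpre
  obtain ⟨hneg, hdvd⟩ := hd
  have hg : req ≤ n ∧ PySem.Int.mod n req = 0 :=
    ⟨by omega, (PySem.Int.mod_eq_zero_iff_dvd n req).2 hdvd⟩
  have h2 := congrArg Prod.snd heq
  rw [resolve_block_size_py, if_pos hg, resolve_block_size_py_alt,
    if_neg (fun h => absurd h.1 (by omega))] at h2
  simp at h2
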